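-- pv_equiv track=rewrite | github.com/juyoung0/AlgorithmPractice | Programmers/HighScoreKit/Heap/spicy.py | solution
-- ===== SOURCE A (Python) =====
-- import heapq
--
-- def solution(scoville, K):
--     heapq.heapify(scoville)
--     done = False
--     mix = 0
--
--     while (not done):
--         if len(scoville) == 1:
--             if scoville[0] < K:
--                 return -1
--             else:
--                 done = True
--         else:
--             if scoville[0] < K:
--                 a = heapq.heappop(scoville)
--                 b = heapq.heappop(scoville)
--                 heapq.heappush(scoville, a + (b * 2))
--                 mix += 1
--             else:
--                 done = True
--
--     answer = mix
--     return answer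
-- ===== SOURCE B (Python) =====
-- def solution(scoville, K):
--     s = sorted(scoville)
--     mix = 0
--     while len(s) > 1 and s[0] < K:
--         x = s[0] + s[1] * 2
--         del s[:2]
--         lo, hi = 0, len(s)
--         while lo < hi:
--             m = (lo + hi) // 2
--             if s[m] < x:
--                 lo = m + 1
--             else:
--                 hi = m
--         s.insert(lo, x)
--         mix += 1
--     return -1 if s[0] < K else mix
-- ===== Notes on version B (the rewrite author's own statement) =====
-- stated objective: alternative
-- what changed: Replaces the binary heap with a sorted array: sort once, repeatedly pop the two front (smallest) elements and re-insert the mix at the position found by a hand-written binary search, instead of heapify/heappop/heappush.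
import Mathlib
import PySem

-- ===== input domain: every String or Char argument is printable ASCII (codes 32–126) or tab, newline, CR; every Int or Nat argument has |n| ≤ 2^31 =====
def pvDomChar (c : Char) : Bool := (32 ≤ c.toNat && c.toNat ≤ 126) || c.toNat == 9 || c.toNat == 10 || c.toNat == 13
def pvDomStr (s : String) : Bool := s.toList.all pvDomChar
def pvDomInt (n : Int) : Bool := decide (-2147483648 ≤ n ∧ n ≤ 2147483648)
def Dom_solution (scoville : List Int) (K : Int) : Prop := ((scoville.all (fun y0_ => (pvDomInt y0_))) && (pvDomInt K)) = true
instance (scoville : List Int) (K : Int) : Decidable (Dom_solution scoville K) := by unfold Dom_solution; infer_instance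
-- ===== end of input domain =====

-- B replaces the binary heap with a sorted array: sort once, pop the two front elements, put the
-- mix back at its sorted position found by binary search. Equivalence is about the RETURN value
-- only — Python A heapifies/pops its argument in place, B leaves its argument untouched.

-- ===== PORT A =====
-- heapq is ported at value level: on a list of Int, heappop returns (and removes) a minimal
-- element and heappush appends; this is exact for every value A's code observes (the root
-- scoville[0] of a heap is its minimum, and Int values carry no identity).
def popMinA : List Int → Int × List Int
  | [] => (0, [])                        -- unreachable: callers pass nonempty lists
  | [x] => (x, [])
  | x :: y :: rest =>
    let p := popMinA (y :: rest)
    if x ≤ p.1 then (x, y :: rest) else (p.1, x :: p.2)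

theorem popMinA_length : ∀ (xs : List Int), xs ≠ [] → (popMinA xs).2.length + 1 = xs.length
  | [], h => absurd rfl h
  | [_], _ => rfl
  | x :: y :: rest, _ => by
    have ih := popMinA_length (y :: rest) (by simp)
    simp only [popMinA]
    split <;> simp_all

-- termination measure fact for goA (cited by its decreasing_by)
theorem goA_dec (x y : Int) (rest : List Int) (v : Int) :
    ((popMinA (popMinA (x :: y :: rest)).2).2 ++ [v]).length < (x :: y :: rest).length := by
  have h1 := popMinA_length (x :: y :: rest) (by simp)
  have h2 : (popMinA (x :: y :: rest)).2 ≠ [] := by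
    intro h; rw [h] at h1; simp at h1
  have h3 := popMinA_length _ h2
  simp only [List.length_append, List.length_cons, List.length_nil] at h1 h3 ⊢
  omega

def goA (xs : List Int) (K : Int) (mix : Int) : Int :=
  match xs with
  | [] => -1                             -- unreachable: Python raises IndexError on the empty list
  | [x] => if x < K then -1 else mix
  | x :: y :: rest =>
    let p := popMinA (x :: y :: rest)    -- heap root is the minimum; pop it
    if p.1 < K then
      let q := popMinA p.2               -- pop the second smallest
      goA (q.2 ++ [p.1 + q.1 * 2]) K (mix + 1)
    else mix
termination_by xs.length
decreasing_by exact goA_dec x y rest _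

def solution (scoville : List Int) (K : Int) : Int := goA scoville K 0

-- ===== PORT B =====
-- the hand-written binary search 'while lo < hi' loop, as structural recursion on a fuel
-- bound ≥ hi - lo (the guard that makes the loop total; with enough fuel it never runs out);
-- s[m] is ported as pyGetD s m 0 — exact here because the loop keeps 0 ≤ lo ≤ m < hi ≤ len(s),
-- so the index is always in range and Python never raises.
def pyBisect : Nat → List Int → Int → Int → Int → Int
  | 0, _, _, lo, _ => lo
  | fuel + 1, s, x, lo, hi =>
    if lo < hi then
      let m := PySem.Int.floordiv (lo + hi) 2
      if PySem.List.pyGetD s m 0 < x then pyBisect fuel s x (m + 1) hi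
      else pyBisect fuel s x lo m
    else lo

-- the outer 'while len(s) > 1 and s[0] < K' loop plus the final 'return -1 if s[0] < K else mix',
-- as structural recursion on a fuel bound = len(s) (each pass shortens s by one, so it never runs out)
def goB : Nat → List Int → Int → Int → Int
  | 0, _, _, _ => -1                     -- fuel exhausted / empty list: Python raises IndexError on s[0]
  | _ + 1, [], _, _ => -1                -- unreachable: the loop keeps s nonempty
  | _ + 1, [y], K, mix => if y < K then -1 else mix
  | fuel + 1, a :: b :: rest, K, mix =>
    if a < K then
      let x := a + b * 2
      goB fuel (PySem.List.insert rest (pyBisect rest.length rest x 0 rest.length) x) K (mix + 1)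
    else mix

def solution_alt (scoville : List Int) (K : Int) : Int :=
  goB (PySem.List.sorted scoville id).length (PySem.List.sorted scoville id) K 0

-- ===== PRECONDITION & SPEC =====
-- Pre_ excludes only the empty list, on which both Pythons raise IndexError (scoville[0]).
def Pre_solution (scoville : List Int) (_K : Int) : Prop := scoville ≠ []
instance (scoville : List Int) (K : Int) : Decidable (Pre_solution scoville K) := by unfold Pre_solution; infer_instance
def pvWitness_solution : List Int × Int := ([1, 2, 3], 7)

def Spec_solution (scoville : List Int) (K : Int) (out : Int) : Prop := out = solution_alt scoville K
instance (scoville : List Int) (K : Int) (out : Int) : Decidable (Spec_solution scoville K out) := by unfold Spec_solution; infer_instance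

-- ===== CLAIM (what is proved, stated in full; the proofs are below) =====
def Claim_equal_solution : Prop := ∀ (scoville : List Int) (K : Int), Dom_solution scoville K → Pre_solution scoville K → Spec_solution scoville K (solution scoville K)

-- ===== LEMMAS AND PROOFS =====

-- bounds of the binary search
theorem pyBisect_bounds : ∀ (fuel : Nat) (s : List Int) (x lo hi : Int),
    lo ≤ hi → lo ≤ pyBisect fuel s x lo hi ∧ pyBisect fuel s x lo hi ≤ hi := by
  intro fuel
  induction fuel with
  | zero => intro s x lo hi hle; exact ⟨le_refl _, hle⟩
  | succ n ih =>
    intro s x lo hi hle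
    rw [pyBisect]
    split
    · rename_i hlt
      have hm1 : lo ≤ PySem.Int.floordiv (lo + hi) 2 :=
        (PySem.Int.le_floordiv_iff_mul_le (by norm_num)).mpr (by omega)
      have hm2 : PySem.Int.floordiv (lo + hi) 2 < hi :=
        (PySem.Int.floordiv_lt_iff_lt_mul (by norm_num)).mpr (by omega)
      dsimp only
      split
      · have := ih s x (PySem.Int.floordiv (lo + hi) 2 + 1) hi (by omega)
        omega
      · have := ih s x lo (PySem.Int.floordiv (lo + hi) 2) (by omega)
        omega
    · exact ⟨le_refl _, hle⟩

-- list.insert at an in-range index splits the list there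
theorem pyInsert_in_range (s : List Int) (i x : Int) (h0 : 0 ≤ i) (h1 : i ≤ s.length) :
    PySem.List.insert s i x = List.take i.toNat s ++ x :: List.drop i.toNat s := by
  simp only [PySem.List.insert, PySem.List.sliceIndices, Int.reduceLT, reduceIte]
  rw [if_neg (by omega), min_eq_left h1]


theorem popMinA_perm : ∀ (xs : List Int), xs ≠ [] → xs.Perm ((popMinA xs).1 :: (popMinA xs).2)
  | [], h => absurd rfl h
  | [_], _ => by simp [popMinA]
  | x :: y :: rest, _ => by
    have ih := popMinA_perm (y :: rest) (by simp)
    simp only [popMinA]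
    split
    · exact List.Perm.refl _
    · exact (ih.cons x).trans (List.Perm.swap _ _ _)

theorem popMinA_min : ∀ (xs : List Int), xs ≠ [] → ∀ z ∈ xs, (popMinA xs).1 ≤ z
  | [], h => absurd rfl h
  | [_], _ => by simp [popMinA]
  | x :: y :: rest, _ => by
    have ih := popMinA_min (y :: rest) (by simp)
    simp only [popMinA]
    split
    · rename_i hx
      intro z hz
      rcases List.mem_cons.mp hz with h | h
      · omega
      · exact le_trans hx (ih z h)
    · rename_i hx
      intro z hz
      rcases List.mem_cons.mp hz with h | h
      · omega
      · exact ih z h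

-- reference insertion into a sorted list, used to describe what goB's binary insertion does
def sortedInsert (x : Int) : List Int → List Int
  | [] => [x]
  | y :: ys => if y < x then y :: sortedInsert x ys else x :: y :: ys

theorem sortedInsert_perm (x : Int) : ∀ (l : List Int), (sortedInsert x l).Perm (x :: l)
  | [] => by simp [sortedInsert]
  | y :: ys => by
    simp only [sortedInsert]
    split
    · exact ((sortedInsert_perm x ys).cons y).trans (List.Perm.swap _ _ _)
    · exact List.Perm.refl _

theorem sortedInsert_sorted (x : Int) : ∀ (l : List Int), l.Pairwise (· ≤ ·) →
    (sortedInsert x l).Pairwise (· ≤ ·)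
  | [], _ => by simp [sortedInsert]
  | y :: ys, h => by
    rcases List.pairwise_cons.mp h with ⟨hy, hys⟩
    simp only [sortedInsert]
    split
    · rename_i hlt
      refine List.pairwise_cons.mpr ⟨?_, sortedInsert_sorted x ys hys⟩
      intro z hz
      rcases List.mem_cons.mp (((sortedInsert_perm x ys).mem_iff).mp hz) with h1 | h1
      · omega
      · exact hy z h1
    · rename_i hlt
      refine List.pairwise_cons.mpr ⟨?_, h⟩
      intro z hz
      rcases List.mem_cons.mp hz with hz2 | hz2
      · omega
      · exact le_trans (by omega) (hy z hz2)

-- on a sorted list, given enough fuel, the binary search finds the boundary: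
-- everything before it is < x, everything from it on is ≥ x
theorem pyBisect_spec : ∀ (fuel : Nat) (s : List Int) (x lo hi : Int), (hi - lo).toNat ≤ fuel →
    s.Pairwise (· ≤ ·) → 0 ≤ lo → lo ≤ hi → hi ≤ s.length →
    (∀ i : Nat, (i : Int) < lo → s.getD i 0 < x) →
    (∀ i : Nat, hi ≤ (i : Int) → i < s.length → ¬ s.getD i 0 < x) →
    (∀ i : Nat, (i : Int) < pyBisect fuel s x lo hi → s.getD i 0 < x) ∧
    (∀ i : Nat, pyBisect fuel s x lo hi ≤ (i : Int) → i < s.length → ¬ s.getD i 0 < x) := by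
  intro fuel
  induction fuel with
  | zero =>
    intro s x lo hi hn hs h0 hle hhi hpre hpost
    have heq : lo = hi := by omega
    simp only [pyBisect]
    exact ⟨fun i h2 => hpre i (by omega), fun i h2 h3 => hpost i (by omega) h3⟩
  | succ n ih =>
    intro s x lo hi hn hs h0 hle hhi hpre hpost
    have hmono : ∀ i j : Nat, i ≤ j → j < s.length → s.getD i 0 ≤ s.getD j 0 := by
      intro i j hij hj
      rcases Nat.eq_or_lt_of_le hij with h | h
      · subst h; exact le_refl _
      · have := (List.pairwise_iff_getElem.mp hs) i j (by omega) hj h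
        rwa [List.getD_eq_getElem s 0 (by omega), List.getD_eq_getElem s 0 hj]
    rw [pyBisect]
    split
    · rename_i hlt
      have hm1 : lo ≤ PySem.Int.floordiv (lo + hi) 2 :=
        (PySem.Int.le_floordiv_iff_mul_le (by norm_num)).mpr (by omega)
      have hm2 : PySem.Int.floordiv (lo + hi) 2 < hi :=
        (PySem.Int.floordiv_lt_iff_lt_mul (by norm_num)).mpr (by omega)
      set m := PySem.Int.floordiv (lo + hi) 2 with hm
      have hgm : PySem.List.pyGetD s m 0 = s.getD m.toNat 0 :=
        PySem.List.pyGetD_of_nonneg s 0 (by omega)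
      have hmlen : m.toNat < s.length := by omega
      dsimp only
      split
      · rename_i hcmp
        rw [hgm] at hcmp
        refine ih s x (m + 1) hi (by omega) hs (by omega) (by omega) hhi ?_ hpost
        intro i hi2
        exact lt_of_le_of_lt (hmono i m.toNat (by omega) hmlen) hcmp
      · rename_i hcmp
        rw [hgm] at hcmp
        refine ih s x lo m (by omega) hs h0 (by omega) (by omega) hpre ?_
        intro i hi2 hilen
        exact fun hc => hcmp (lt_of_le_of_lt (hmono m.toNat i (by omega) hilen) hc)
    · exact ⟨fun i h2 => hpre i (by omega), fun i h2 h3 => hpost i (by omega) h3⟩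

-- splitting a sorted list at the boundary and inserting x there is the sorted insertion
theorem take_drop_eq_sortedInsert (x : Int) : ∀ (s : List Int) (r : Nat), r ≤ s.length →
    (∀ i : Nat, i < r → s.getD i 0 < x) →
    (∀ i : Nat, r ≤ i → i < s.length → ¬ s.getD i 0 < x) →
    List.take r s ++ x :: List.drop r s = sortedInsert x s
  | [], r, hr, _, _ => by
    have hr0 : r = 0 := by simpa using hr
    subst hr0
    simp [sortedInsert]
  | y :: t, 0, _, _, hpost => by
    have h0 := hpost 0 (by omega) (by simp)
    simp only [List.getD_cons_zero] at h0
    simp [sortedInsert, h0]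
  | y :: t, r + 1, hr, hpre, hpost => by
    have h0 := hpre 0 (by omega)
    simp only [List.getD_cons_zero] at h0
    have ih := take_drop_eq_sortedInsert x t r (by simpa using hr)
      (fun i h2 => by simpa using hpre (i + 1) (by omega))
      (fun i h2 h3 => by simpa using hpost (i + 1) (by omega) (by simpa using h3))
    simp [sortedInsert, h0, ih]

-- goB's binary insertion, on a sorted list, IS the sorted insertion
theorem pyInsert_bisect (x : Int) (s : List Int) (hs : s.Pairwise (· ≤ ·)) :
    PySem.List.insert s (pyBisect s.length s x 0 s.length) x = sortedInsert x s := by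
  have hb := pyBisect_bounds s.length s x 0 s.length (by omega)
  have hspec := pyBisect_spec s.length s x 0 s.length (by omega) hs (by omega) (by omega) (by omega)
    (fun i h2 => by omega) (fun i h2 h3 => by omega)
  rw [pyInsert_in_range s _ x (by omega) (by omega)]
  exact take_drop_eq_sortedInsert x s (pyBisect s.length s x 0 s.length).toNat (by omega)
    (fun i h2 => hspec.1 i (by omega))
    (fun i h2 h3 => hspec.2 i (by omega) h3)

-- core: goA on any list equals goB on a sorted permutation of it
theorem goA_eq_goB : ∀ (n : Nat) (xs ys : List Int) (K mix : Int),
    xs.length = n → xs.Perm ys → ys.Pairwise (· ≤ ·) → goA xs K mix = goB n ys K mix := by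
  intro n
  induction n with
  | zero =>
    intro xs ys K mix hlen hperm _
    have hxs : xs = [] := List.length_eq_zero_iff.mp hlen
    subst hxs
    have hys : ys = [] := (List.Perm.nil_eq hperm).symm
    subst hys
    rw [goA.eq_def]
    rfl
  | succ n ih =>
    intro xs ys K mix hlen hperm hsorted
    match xs, ys with
    | [], _ => simp at hlen
    | _ :: _, [] => exact absurd hperm.symm (by simp)
    | [x], [y] =>
      have : x = y := by
        have := hperm.mem_iff (a := x); simp at this; omega
      subst this
      rw [goA.eq_def]
      rfl
    | [x], _ :: _ :: _ => have := hperm.length_eq; simp at this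
    | _ :: _ :: _, [_] => have := hperm.length_eq; simp at this
    | x :: y :: rest, a :: b :: rs =>
      -- first pop is the sorted head a
      have hne : (x :: y :: rest : List Int) ≠ [] := by simp
      have hp := popMinA_perm _ hne
      have hpmin := popMinA_min _ hne
      set p := popMinA (x :: y :: rest) with hpdef
      have hsorted_tail : (b :: rs : List Int).Pairwise (· ≤ ·) :=
        (List.pairwise_cons.mp hsorted).2
      have ha_min : ∀ z ∈ (a :: b :: rs : List Int), a ≤ z := by
        intro z hz
        rcases List.mem_cons.mp hz with h | h
        · omega
        · exact (List.pairwise_cons.mp hsorted).1 z h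
      have hp1a : p.1 = a := by
        have h1 : p.1 ∈ (a :: b :: rs : List Int) :=
          (hperm.mem_iff).mp (hp.mem_iff.mpr (List.mem_cons_self))
        have h2 : a ∈ (x :: y :: rest : List Int) :=
          (hperm.mem_iff).mpr (List.mem_cons_self)
        have := ha_min _ h1
        have := hpmin a h2
        omega
      have hperm2 : p.2.Perm (b :: rs) := by
        have : (p.1 :: p.2 : List Int).Perm (a :: b :: rs) := hp.symm.trans hperm
        rw [hp1a] at this
        exact this.cons_inv
      -- second pop is b
      have hne2 : p.2 ≠ [] := by
        intro h; rw [h] at hperm2; have := hperm2.length_eq; simp at this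
      have hq := popMinA_perm _ hne2
      have hqmin := popMinA_min _ hne2
      set q := popMinA p.2 with hqdef
      have hb_min : ∀ z ∈ (b :: rs : List Int), b ≤ z := by
        intro z hz
        rcases List.mem_cons.mp hz with h | h
        · omega
        · exact (List.pairwise_cons.mp hsorted_tail).1 z h
      have hq1b : q.1 = b := by
        have h1 : q.1 ∈ (b :: rs : List Int) :=
          (hperm2.mem_iff).mp (hq.mem_iff.mpr (List.mem_cons_self))
        have h2 : b ∈ p.2 := (hperm2.mem_iff).mpr (List.mem_cons_self)
        have := hb_min _ h1
        have := hqmin b h2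
        omega
      have hperm3 : q.2.Perm rs := by
        have : (q.1 :: q.2 : List Int).Perm (b :: rs) := hq.symm.trans hperm2
        rw [hq1b] at this
        exact this.cons_inv
      have hrs_sorted : rs.Pairwise (· ≤ ·) := (List.pairwise_cons.mp hsorted_tail).2
      -- unfold one step of each loop
      show goA (x :: y :: rest) K mix = goB (n + 1) (a :: b :: rs) K mix
      rw [goA.eq_def, goB]
      dsimp only
      simp only [← hpdef, ← hqdef, hp1a, hq1b]
      rw [pyInsert_bisect (a + b * 2) rs hrs_sorted]
      split
      · -- recursive case: apply ih to the new states
        apply ih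
        · have hl1 : p.2.length = rest.length + 1 := by
            have := popMinA_length _ hne; rw [← hpdef] at this; simp at this; omega
          have hl2 : q.2.length + 1 = p.2.length := popMinA_length _ hne2
          have hl3 : (x :: y :: rest : List Int).length = n + 1 := hlen
          simp only [List.length_cons] at hl3
          simp [List.length_append]; omega
        · exact (List.perm_append_singleton _ _).trans
            ((hperm3.cons _).trans (sortedInsert_perm _ _).symm)
        · exact sortedInsert_sorted _ _ hrs_sorted
      · rfl

-- ===== VERDICT (by name: the statement is the Claim_ definition above) =====
theorem solution_spec : Claim_equal_solution := by
  intro scoville K _ _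
  unfold Spec_solution solution solution_alt
  have hp : scoville.Perm (PySem.List.sorted scoville id) :=
    (PySem.List.sorted_perm scoville id false).symm
  exact goA_eq_goB (PySem.List.sorted scoville id).length scoville _ K 0 hp.length_eq hp
    (by simpa using PySem.List.sorted_pairwise scoville id)
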